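-- pv_equiv track=rewrite | github.com/urvashixo/memint | TamGen/customized_example/reverse_SMILES.py | generate_smiles
-- ===== SOURCE A (Python) =====
-- from itertools import product
--
-- def generate_smiles(smiles_string):
--     parts = smiles_string.replace("[C@H]", "[C@@H]").split("[C@@H]")
--     combinations = product(*[["[C@H]", "[C@@H]"]] * (len(parts) - 1))
--
--     # Generate all possible SMILES strings
--     smiles_strings = []
--     for combination in combinations:
--         smiles = parts[0]
--         for i in range(1, len(parts)):
--             smiles += combination[i - 1] + parts[i]
--         smiles_strings.append(smiles)
--
--     return smiles_strings
-- ===== SOURCE B (Python) =====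
-- def generate_smiles(smiles_string):
--     parts = smiles_string.replace("[C@H]", "[C@@H]").split("[C@@H]")
--     current = [parts[0]]
--     for part in parts[1:]:
--         current = [s + tag + part
--                    for s in current
--                    for tag in ("[C@H]", "[C@@H]")]
--     return current
-- ===== Notes on version B (the rewrite author's own statement) =====
-- stated objective: simpler
-- what changed: B replaces itertools.product enumeration plus per-tuple reconstruction with an incremental fold: a running list of partial strings is doubled at each stereo center, so no tuple of tags is ever materialised.
import Mathlib
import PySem

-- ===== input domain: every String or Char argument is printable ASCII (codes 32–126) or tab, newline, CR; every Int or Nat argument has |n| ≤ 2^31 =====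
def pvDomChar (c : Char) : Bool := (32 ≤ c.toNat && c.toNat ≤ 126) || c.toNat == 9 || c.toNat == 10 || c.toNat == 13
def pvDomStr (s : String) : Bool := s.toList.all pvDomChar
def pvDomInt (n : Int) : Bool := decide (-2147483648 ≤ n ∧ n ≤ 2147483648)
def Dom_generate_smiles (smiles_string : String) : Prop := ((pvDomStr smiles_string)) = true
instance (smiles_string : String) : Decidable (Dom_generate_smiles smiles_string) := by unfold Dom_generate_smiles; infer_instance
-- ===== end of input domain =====

-- B rebuilds the list of variants by doubling a running list of partial strings at each
-- stereo center, instead of enumerating itertools.product tuples and reconstructing each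
-- string from the parts (objective: simpler; same asymptotic cost).

-- ===== PORT A =====
-- the two stereo tags (the repeated factor of itertools.product)
def pvTags : List String := ["[C@H]", "[C@@H]"]

-- itertools.product(*[["[C@H]", "[C@@H]"]] * n): first factor varies slowest
def pvProduct : Nat → List (List String)
  | 0 => [[]]
  | n + 1 => pvTags.flatMap (fun t => (pvProduct n).map (t :: ·))

def generate_smiles (smiles_string : String) : List String :=
  let parts := (PySem.Str.split? (PySem.Str.replace smiles_string "[C@H]" "[C@@H]") "[C@@H]").getD []
  let combinations := pvProduct (parts.length - 1)
  combinations.foldl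
    (fun acc combination =>
      let smiles := PySem.List.pyGetD parts 0 ""
      let smiles := (PySem.List.pyRange 1 (parts.length : Int) 1).foldl
        (fun sm i => sm ++ PySem.List.pyGetD combination (i - 1) "" ++ PySem.List.pyGetD parts i "")
        smiles
      acc ++ [smiles])
    []

-- ===== PORT B =====
def generate_smiles_alt (smiles_string : String) : List String :=
  let parts := (PySem.Str.split? (PySem.Str.replace smiles_string "[C@H]" "[C@@H]") "[C@@H]").getD []
  (parts.drop 1).foldl
    (fun current part => current.flatMap (fun s => pvTags.map (fun tag => s ++ tag ++ part)))
    [PySem.List.pyGetD parts 0 ""]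

-- ===== PRECONDITION & SPEC =====
def Spec_generate_smiles (smiles_string : String) (out : List String) : Prop := out = generate_smiles_alt smiles_string
instance (smiles_string : String) (out : List String) : Decidable (Spec_generate_smiles smiles_string out) := by unfold Spec_generate_smiles; infer_instance

-- ===== CLAIM (what is proved, stated in full; the proofs are below) =====
def Claim_equal_generate_smiles : Prop := ∀ (smiles_string : String), Dom_generate_smiles smiles_string → Spec_generate_smiles smiles_string (generate_smiles smiles_string)

-- ===== LEMMAS AND PROOFS =====

-- a tuple of tags interleaved with the remaining parts, appended after init
def pvBuild (init : String) (rest comb : List String) : String :=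
  (comb.zip rest).foldl (fun sm tp => sm ++ tp.1 ++ tp.2) init

theorem pvBuild_cons (s p t : String) (ps c : List String) :
    pvBuild s (p :: ps) (t :: c) = pvBuild (s ++ t ++ p) ps c := rfl

theorem pvProduct_length {n : Nat} {c : List String} (hc : c ∈ pvProduct n) : c.length = n := by
  induction n generalizing c with
  | zero => simp [pvProduct] at hc; simp [hc]
  | succ n ih =>
    simp [pvProduct] at hc
    obtain ⟨t, _, c', hc', rfl⟩ := hc
    simp [ih hc']

-- A's index-driven inner loop, rewritten over List.range, equals the structural zip fold
theorem pvInner_range (rest : List String) :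
    ∀ (comb : List String) (init : String), comb.length = rest.length →
    (List.range rest.length).foldl
      (fun sm k => sm ++ comb.getD k "" ++ rest.getD k "") init
    = (comb.zip rest).foldl (fun sm tp => sm ++ tp.1 ++ tp.2) init := by
  induction rest with
  | nil => intro comb init h; simp
  | cons r rs ih =>
    intro comb init h
    cases comb with
    | nil => simp at h
    | cons c cs =>
      simp only [List.length_cons, List.range_succ_eq_map, List.foldl_cons, List.foldl_map,
        List.getD_cons_zero, List.getD_cons_succ, List.zip_cons_cons]
      exact ih cs (init ++ c ++ r) (by simpa using h)

-- A's inner loop (pyRange / pyGetD form) computes pvBuild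
theorem pvInner (p0 init : String) (rest comb : List String) (h : comb.length = rest.length) :
    (PySem.List.pyRange 1 ((p0 :: rest).length : Int) 1).foldl
      (fun sm i => sm ++ PySem.List.pyGetD comb (i - 1) "" ++ PySem.List.pyGetD (p0 :: rest) i "")
      init
    = pvBuild init rest comb := by
  rw [PySem.List.pyRange_one]
  have hlen : (((p0 :: rest).length : Int) - 1).toNat = rest.length := by simp
  rw [hlen, List.foldl_map]
  have hfun : (fun (sm : String) (k : Nat) =>
        sm ++ PySem.List.pyGetD comb (1 + (k : Int) - 1) "" ++ PySem.List.pyGetD (p0 :: rest) (1 + (k : Int)) "")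
      = fun sm k => sm ++ comb.getD k "" ++ rest.getD k "" := by
    funext sm k
    have h1 : (1 : Int) + (k : Int) - 1 = ((k : Nat) : Int) := by omega
    have h2 : (1 : Int) + (k : Int) = (((k + 1 : Nat)) : Int) := by omega
    rw [h1, h2, PySem.List.pyGetD_natCast, PySem.List.pyGetD_natCast]
    simp
  rw [hfun]
  exact pvInner_range rest comb init h

-- one doubling step of B, per seed string
theorem pvStep1 (s p : String) (ps : List String) :
    (pvTags.map (fun t => s ++ t ++ p)).flatMap
      (fun s' => (pvProduct ps.length).map (fun c => pvBuild s' ps c))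
    = (pvProduct (ps.length + 1)).map (fun c => pvBuild s (p :: ps) c) := by
  simp [pvTags, pvProduct, List.map_map, Function.comp_def, pvBuild_cons]

theorem pvFlat (cur : List String) (p : String) (ps : List String) :
    (cur.flatMap (fun s => pvTags.map (fun t => s ++ t ++ p))).flatMap
      (fun s' => (pvProduct ps.length).map (fun c => pvBuild s' ps c))
    = cur.flatMap (fun s => (pvProduct (ps.length + 1)).map (fun c => pvBuild s (p :: ps) c)) := by
  induction cur with
  | nil => rfl
  | cons s cur ih => simp only [List.flatMap_cons, List.flatMap_append, ih, pvStep1]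

-- B's doubling fold enumerates exactly the pvProduct tuples, built with pvBuild
theorem pvFoldB (rest : List String) :
    ∀ (cur : List String),
    rest.foldl (fun current part => current.flatMap (fun s => pvTags.map (fun tag => s ++ tag ++ part))) cur
    = cur.flatMap (fun s => (pvProduct rest.length).map (fun comb => pvBuild s rest comb)) := by
  induction rest with
  | nil =>
    intro cur
    simp [pvProduct, pvBuild]
  | cons p ps ih =>
    intro cur
    simp only [List.foldl_cons]
    rw [ih]
    simp only [List.length_cons]
    exact pvFlat cur p ps

theorem generate_smiles_eq_alt (s : String) : generate_smiles s = generate_smiles_alt s := by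
  unfold generate_smiles generate_smiles_alt
  generalize (PySem.Str.split? (PySem.Str.replace s "[C@H]" "[C@@H]") "[C@@H]").getD [] = parts
  cases parts with
  | nil => simp [pvProduct, PySem.List.pyRange, PySem.List.pyGetD]
  | cons p0 rest =>
    simp only [List.drop_succ_cons, List.drop_zero, pvFoldB rest,
      List.flatMap_cons, List.flatMap_nil, List.append_nil,
      List.length_cons, Nat.add_sub_cancel]
    rw [PySem.List.foldl_append_singleton_eq_map]
    simp only [List.nil_append]
    apply List.map_congr_left
    intro comb hcomb
    exact pvInner p0 (PySem.List.pyGetD (p0 :: rest) 0 "") rest comb (pvProduct_length hcomb)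

-- ===== VERDICT (by name: the statement is the Claim_ definition above) =====
theorem generate_smiles_spec : Claim_equal_generate_smiles := by
  intro s _
  exact generate_smiles_eq_alt s
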